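-- pv_equiv track=rewrite | github.com/humancipher/Programming_Contest | Programming_Contest/AtCoder/ABC/ABC_001-099/ABC_030-039/ABC_033/ABC_033_C.py | solve
-- ===== SOURCE A (Python) =====
-- def solve(S):
--     cnt = 0
--     zero = False
--     for i in range(len(S)):
--         if S[i] != "+" and S[i] != "*":
--             if S[i] == "0":
--                 zero = True
--         elif S[i] == "+":
--             if not zero:
--                 cnt += 1
--             else:
--                 zero = False
--         else:
--             continue
--     if not zero:
--         cnt += 1
--
--     return cnt
-- ===== SOURCE B (Python) =====
-- def solve(S):
--     return sum('0' not in term for term in S.split('+'))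
-- ===== Notes on version B (the rewrite author's own statement) =====
-- stated objective: simpler
-- what changed: Replaces the character-by-character state machine (zero flag, branch ladder, end-of-string fixup) with split on the separator and a one-line count of terms containing no zero character.
import Mathlib
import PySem

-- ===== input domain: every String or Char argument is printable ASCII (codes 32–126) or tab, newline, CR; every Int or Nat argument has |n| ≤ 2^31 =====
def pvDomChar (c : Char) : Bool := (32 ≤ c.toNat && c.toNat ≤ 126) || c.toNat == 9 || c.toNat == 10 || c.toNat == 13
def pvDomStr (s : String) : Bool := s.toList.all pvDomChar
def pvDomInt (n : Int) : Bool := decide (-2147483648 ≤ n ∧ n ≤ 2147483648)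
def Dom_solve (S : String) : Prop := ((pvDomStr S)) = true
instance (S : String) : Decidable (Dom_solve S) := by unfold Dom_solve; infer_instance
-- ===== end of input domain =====

-- B replaces A's per-character state machine by split('+') + count of terms without '0' (objective: simpler).

-- ===== PORT A =====
-- one loop step of A: the branch ladder on S[i], state (cnt, zero)
def solveStep (st : Int × Bool) (c : Char) : Int × Bool :=
  if c ≠ '+' ∧ c ≠ '*' then
    (if c = '0' then (st.1, true) else st)
  else if c = '+' then
    (if st.2 = false then (st.1 + 1, st.2) else (st.1, false))
  else st

def solve (S : String) : Int :=
  let st := S.toList.foldl solveStep (0, false)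
  if st.2 = false then st.1 + 1 else st.1

-- ===== PORT B =====
def solve_alt (S : String) : Int :=
  ((PySem.Chars.splitOn S.toList ['+']).map
    (fun term => if PySem.Chars.isIn ['0'] term then (0 : Int) else 1)).sum

-- ===== PRECONDITION & SPEC =====
def Spec_solve (S : String) (out : Int) : Prop := out = solve_alt S
instance (S : String) (out : Int) : Decidable (Spec_solve S out) := by unfold Spec_solve; infer_instance

-- ===== CLAIM (what is proved, stated in full; the proofs are below) =====
def Claim_equal_solve : Prop := ∀ (S : String), Dom_solve S → Spec_solve S (solve S)

-- ===== LEMMAS AND PROOFS =====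

-- count of good (zero-free) terms among a list of terms
def countGood (parts : List (List Char)) : Int :=
  (parts.map (fun term => if PySem.Chars.isIn ['0'] term then (0 : Int) else 1)).sum

theorem isIn_singleton (a : Char) (l : List Char) :
    PySem.Chars.isIn [a] l = l.contains a := by
  by_cases h : a ∈ l
  · have hi : [a] <:+: l := by
      obtain ⟨s, t, rfl⟩ := List.append_of_mem h
      exact ⟨s, t, by simp⟩
    simp [(PySem.Chars.isIn_iff_infix _ _).mpr hi, h]
  · have hi : ¬ [a] <:+: l := fun hin => h (List.singleton_sublist.mp hin.sublist)
    simp [(PySem.Chars.isIn_eq_false_iff _ _).mpr hi, h]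

theorem countGood_reverse (parts : List (List Char)) :
    countGood parts.reverse = countGood parts := by
  simp [countGood, List.sum_reverse]

theorem countGood_cons (t : List Char) (acc : List (List Char)) :
    countGood (t :: acc) = (if '0' ∈ t then 0 else 1) + countGood acc := by
  simp [countGood, isIn_singleton]

theorem go_nil (fuel : Nat) (cur : List Char) (acc : List (List Char)) :
    PySem.Chars.splitOn.go ['+'] fuel [] cur acc = (cur.reverse :: acc).reverse := by
  cases fuel <;> simp [PySem.Chars.splitOn.go]

theorem go_cons (fuel : Nat) (c : Char) (rest cur : List Char) (acc : List (List Char)) :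
    PySem.Chars.splitOn.go ['+'] (fuel + 1) (c :: rest) cur acc =
      if c = '+' then PySem.Chars.splitOn.go ['+'] fuel rest [] (cur.reverse :: acc)
      else PySem.Chars.splitOn.go ['+'] fuel rest (c :: cur) acc := by
  by_cases h : c = '+'
  · simp [PySem.Chars.splitOn.go, List.isPrefixOf, h]
  · simp [PySem.Chars.splitOn.go, List.isPrefixOf, h, Ne.symm h]

-- the loop invariant: A's running state vs splitOn.go's running state
theorem main_inv (l : List Char) : ∀ (fuel : Nat) (cur : List Char)
    (acc : List (List Char)) (cnt : Int), l.length ≤ fuel →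
    (let st := l.foldl solveStep (cnt, cur.contains '0')
     if st.2 = false then st.1 + 1 else st.1) + countGood acc
      = cnt + countGood (PySem.Chars.splitOn.go ['+'] fuel l cur acc) := by
  induction l with
  | nil =>
    intro fuel cur acc cnt _
    rw [go_nil, countGood_reverse, countGood_cons]
    simp only [List.foldl_nil, List.mem_reverse]
    by_cases h : '0' ∈ cur <;> simp [h] <;> ring
  | cons c rest ih =>
    intro fuel cur acc cnt hlen
    obtain ⟨f, rfl⟩ : ∃ f, fuel = f + 1 := by
      cases fuel with
      | zero => simp at hlen
      | succ f => exact ⟨f, rfl⟩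
    have hf : rest.length ≤ f := by simpa using hlen
    rw [go_cons]
    by_cases hc : c = '+'
    · subst hc
      rw [if_pos rfl, List.foldl_cons]
      by_cases h : '0' ∈ cur
      · have hz : cur.contains '0' = true := by simpa using h
        have hstep : solveStep (cnt, cur.contains '0') '+' = (cnt, false) := by
          simp [solveStep, h]
        rw [hstep]
        have ihx := ih f [] (cur.reverse :: acc) cnt hf
        simp only [List.contains_nil] at ihx
        have hcg : countGood (cur.reverse :: acc) = 0 + countGood acc := by
          rw [countGood_cons]; simp [h]
        rw [hcg] at ihx
        linarith [ihx]
      · have hz : cur.contains '0' = false := by simpa using h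
        have hstep : solveStep (cnt, cur.contains '0') '+' = (cnt + 1, false) := by
          simp [solveStep, h]
        rw [hstep]
        have ihx := ih f [] (cur.reverse :: acc) (cnt + 1) hf
        simp only [List.contains_nil] at ihx
        have hcg : countGood (cur.reverse :: acc) = 1 + countGood acc := by
          rw [countGood_cons]; simp [h]
        rw [hcg] at ihx
        linarith [ihx]
    · have hcc : ((c :: cur).contains '0') = (cur.contains '0') ∨ c = '0' := by
        by_cases h0 : c = '0'
        · exact Or.inr h0
        · exact Or.inl (by simp [Ne.symm h0])
      have hstep : solveStep (cnt, cur.contains '0') c = (cnt, (c :: cur).contains '0') := by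
        by_cases hs : c = '*'
        · subst hs; simp [solveStep]
        · by_cases h0 : c = '0'
          · subst h0; simp [solveStep]
          · rcases hcc with hcc | hcc
            · simp [solveStep, hc, hs, h0, Ne.symm h0]
            · exact absurd hcc h0
      rw [if_neg hc, List.foldl_cons, hstep]
      exact ih f (c :: cur) acc cnt hf

-- ===== VERDICT (by name: the statement is the Claim_ definition above) =====
theorem solve_spec : Claim_equal_solve := by
  intro S _
  show solve S = solve_alt S
  have h := main_inv S.toList (S.toList.length + 1) [] [] 0 (by omega)
  simp only [List.contains_nil, countGood, List.map_nil, List.sum_nil, add_zero, zero_add] at h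
  simpa [solve, solve_alt, PySem.Chars.splitOn, countGood] using h
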